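-- pv_equiv track=rewrite | github.com/vikasvisking/courses | codeacademy/python/path2/oddindices.py | odd_indices
-- ===== SOURCE A (Python) =====
-- def odd_indices(lst):
--   newLst = []
--   i = 0
--   for item in lst:
--     i +=1
--     if (len(lst)>i and i % 2 == 1):
--       newLst.append(lst[i])
--   return newLst
-- ===== SOURCE B (Python) =====
-- def odd_indices(lst):
--   return list(lst[1::2])
-- ===== Notes on version B (the rewrite author's own statement) =====
-- stated objective: simpler
-- what changed: Replaces the manual counter-and-parity loop (which tests len(lst)>i and i%2 before indexing each element) with a single extended slice lst[1::2]; list(...) keeps the list return type.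
import Mathlib
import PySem

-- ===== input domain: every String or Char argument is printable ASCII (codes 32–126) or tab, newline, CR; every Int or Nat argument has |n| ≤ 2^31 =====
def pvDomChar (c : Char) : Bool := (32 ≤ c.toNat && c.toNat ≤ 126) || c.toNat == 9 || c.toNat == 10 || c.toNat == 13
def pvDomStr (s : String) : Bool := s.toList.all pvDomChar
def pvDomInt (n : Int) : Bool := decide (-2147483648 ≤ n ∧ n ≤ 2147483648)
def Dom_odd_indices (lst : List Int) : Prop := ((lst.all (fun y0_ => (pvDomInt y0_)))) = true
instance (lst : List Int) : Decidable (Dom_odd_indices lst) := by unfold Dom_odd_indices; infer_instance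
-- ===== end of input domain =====

-- B: one extended slice lst[1::2] instead of A's counter-and-parity loop (simpler).
-- ===== PORT A =====
-- A: newLst = []; i = 0; for item in lst: i += 1; if len(lst) > i and i % 2 == 1: newLst.append(lst[i])
def odd_indices (lst : List Int) : List Int :=
  (lst.foldl
    (fun (st : List Int × Int) (_item : Int) =>
      let i : Int := st.2 + 1
      let newLst : List Int :=
        if (lst.length : Int) > i ∧ i % 2 = 1 then
          st.1 ++ [(PySem.List.pyGet? lst i).getD 0]  -- guard ensures index in range; getD only totalises
        else st.1
      (newLst, i))
    ([], 0)).1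

-- ===== PORT B =====
-- B: return list(lst[1::2]); step literal 2 ≠ 0, so slice? is always some (getD only totalises)
def odd_indices_alt (lst : List Int) : List Int :=
  (PySem.List.slice? lst (some 1) none 2).getD []

-- ===== PRECONDITION & SPEC =====
def Spec_odd_indices (lst : List Int) (out : List Int) : Prop := out = odd_indices_alt lst
instance (lst : List Int) (out : List Int) : Decidable (Spec_odd_indices lst out) := by unfold Spec_odd_indices; infer_instance

-- ===== CLAIM (what is proved, stated in full; the proofs are below) =====
def Claim_equal_odd_indices : Prop := ∀ (lst : List Int), Dom_odd_indices lst → Spec_odd_indices lst (odd_indices lst)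

-- ===== LEMMAS AND PROOFS =====
-- the common normal form: elements at indices 1, 3, 5, …
def oddElems (lst : List Int) : List Int :=
  (List.range (lst.length / 2)).map (fun k => (PySem.List.pyGet? lst ((2 * k + 1 : Nat) : Int)).getD 0)

def stepA (lst : List Int) (st : List Int × Int) : List Int × Int :=
  let i : Int := st.2 + 1
  let newLst : List Int :=
    if (lst.length : Int) > i ∧ i % 2 = 1 then
      st.1 ++ [(PySem.List.pyGet? lst i).getD 0]
    else st.1
  (newLst, i)

theorem foldl_const_iterate {α β : Type} (f : β → β) (l : List α) (st : β) :
    l.foldl (fun s _ => f s) st = f^[l.length] st := by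
  induction l generalizing st with
  | nil => rfl
  | cons x xs ih => simp [List.foldl, Function.iterate_succ_apply, ih]

theorem iterate_stepA (lst : List Int) (n : Nat) (hn : n ≤ lst.length) :
    (stepA lst)^[n] ([], 0) =
      ((List.range (min ((n + 1) / 2) (lst.length / 2))).map
        (fun k => (PySem.List.pyGet? lst ((2 * k + 1 : Nat) : Int)).getD 0), (n : Int)) := by
  induction n with
  | zero => simp
  | succ n ih =>
    rw [Function.iterate_succ_apply', ih (by omega)]
    unfold stepA
    by_cases hc : ((lst.length : Int) > (n : Int) + 1 ∧ ((n : Int) + 1) % 2 = 1)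
    · -- n even and n + 1 < lst.length : one more element, at index n + 1 = 2 * (n / 2) + 1
      have hlt : n + 1 < lst.length := by exact_mod_cast hc.1
      have hev : n % 2 = 0 := by have := hc.2; omega
      have hmin1 : min ((n + 1) / 2) (lst.length / 2) = n / 2 := by omega
      have hmin2 : min ((n + 2) / 2) (lst.length / 2) = n / 2 + 1 := by omega
      have hidx : ((2 * (n / 2) + 1 : Nat) : Int) = (n : Int) + 1 := by
        have h : 2 * (n / 2) + 1 = n + 1 := by omega
        rw [h]; push_cast; ring
      simp only [if_pos hc, hmin1, hmin2, List.range_succ, List.map_append, List.map_cons,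
        List.map_nil, hidx, Prod.mk.injEq]
      exact ⟨trivial, by push_cast; ring⟩
    · -- no new element: n odd, or n + 1 ≥ lst.length
      have hmin : min ((n + 2) / 2) (lst.length / 2) = min ((n + 1) / 2) (lst.length / 2) := by
        rcases not_and_or.mp hc with h | h <;> omega
      simp only [if_neg hc, hmin, Prod.mk.injEq]
      exact ⟨trivial, by push_cast; ring⟩

theorem odd_indices_eq_oddElems (lst : List Int) : odd_indices lst = oddElems lst := by
  have h1 : odd_indices lst = ((stepA lst)^[lst.length] ([], 0)).1 :=
    congrArg Prod.fst (foldl_const_iterate (stepA lst) lst ([], 0))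
  have h2 : min ((lst.length + 1) / 2) (lst.length / 2) = lst.length / 2 := by omega
  rw [h1, iterate_stepA lst lst.length le_rfl]
  simp [oddElems, h2]

theorem odd_indices_alt_eq_oddElems (lst : List Int) : odd_indices_alt lst = oddElems lst := by
  unfold odd_indices_alt oddElems
  simp only [PySem.List.slice?, PySem.List.sliceIndices]
  norm_num
  rcases Nat.eq_zero_or_pos lst.length with h0 | hpos
  · simp [List.length_eq_zero_iff.mp h0]
  · have hmin : min 1 (lst.length : Int) = 1 := by omega
    rw [hmin]
    have hcount : (if 1 < lst.length then (((lst.length : Int) - 1 + 2 - 1) / 2).toNat else 0)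
        = lst.length / 2 := by
      split_ifs with h <;> omega
    rw [hcount]
    have hpt : ∀ k ∈ List.range (lst.length / 2),
        lst[((1 : Int) + 2 * (k : Int)).toNat]? =
          (fun k : Nat => some ((PySem.List.pyGet? lst (2 * (k : Int) + 1)).getD 0)) k := by
      intro k hk
      have hk' : k < lst.length / 2 := List.mem_range.mp hk
      have hidx : ((1 : Int) + 2 * (k : Int)).toNat = 2 * k + 1 := by omega
      have hlt : 2 * k + 1 < lst.length := by omega
      have hcast : (2 * (k : Int) + 1) = ((2 * k + 1 : Nat) : Int) := by push_cast; ring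
      simp only [hidx, hcast, PySem.List.pyGet?_natCast, List.getElem?_eq_getElem hlt,
        Option.getD_some]
    rw [List.filterMap_congr hpt]
    exact List.filterMap_eq_map.symm ▸ rfl

-- ===== VERDICT (by name: the statement is the Claim_ definition above) =====
theorem odd_indices_spec : Claim_equal_odd_indices := by
  intro lst _
  unfold Spec_odd_indices
  rw [odd_indices_eq_oddElems, odd_indices_alt_eq_oddElems]
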